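-- pv_equiv track=rewrite | github.com/ryaneveson/COSC490FinalProject | 0-D/Phase3/Step7.py | _char_classes
-- ===== SOURCE A (Python) =====
-- from typing import Dict, List, Set, Tuple
--
-- def _char_classes(p: str) -> Set[str]:
--     s = set()
--     for c in p:
--         if c.islower():
--             s.add("lower")
--         elif c.isupper():
--             s.add("upper")
--         elif c.isdigit():
--             s.add("digit")
--         else:
--             s.add("special")
--     return s
-- ===== SOURCE B (Python) =====
-- def _char_classes(p: str):
--     def cls(c):
--         if c.islower():
--             return "lower"
--         if c.isupper():
--             return "upper"
--         if c.isdigit():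
--             return "digit"
--         return "special"
--
--     def go(chars):
--         if not chars:
--             return []
--         k = cls(chars[0])
--         return [k] + go([c for c in chars[1:] if cls(c) != k])
--
--     return set(go(list(p)))
-- ===== Notes on version B (the rewrite author's own statement) =====
-- stated objective: alternative
-- what changed: Replaces the single pass that classifies each character and adds to a growing set with a recursive partition: classify the first character, drop every remaining character of that class, and recurse (at most four levels, since there are four classes).
import Mathlib
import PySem

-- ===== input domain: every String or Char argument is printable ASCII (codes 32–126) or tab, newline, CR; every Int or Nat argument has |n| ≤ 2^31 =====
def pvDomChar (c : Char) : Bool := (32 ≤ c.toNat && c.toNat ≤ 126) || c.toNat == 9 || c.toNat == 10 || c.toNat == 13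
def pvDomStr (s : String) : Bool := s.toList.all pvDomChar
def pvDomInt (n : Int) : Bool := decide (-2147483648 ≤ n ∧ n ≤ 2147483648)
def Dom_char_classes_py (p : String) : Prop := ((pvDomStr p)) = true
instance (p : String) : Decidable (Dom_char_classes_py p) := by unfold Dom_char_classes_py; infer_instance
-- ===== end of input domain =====

-- B recursively partitions by the first character's class instead of A's one-pass set accumulation; same cost, different traversal (objective: alternative).

-- ===== PORT A =====
def char_classes_py (p : String) : List String :=
  p.toList.foldl (fun s c =>
    if PySem.Chars.islower c then PySem.Set.add s "lower"
    else if PySem.Chars.isupper c then PySem.Set.add s "upper"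
    else if PySem.Chars.isdigit c then PySem.Set.add s "digit"
    else PySem.Set.add s "special") PySem.Set.empty

-- ===== PORT B =====
def pvCls (c : Char) : String :=
  if PySem.Chars.islower c then "lower"
  else if PySem.Chars.isupper c then "upper"
  else if PySem.Chars.isdigit c then "digit"
  else "special"

def pvGo : List Char → List String
  | [] => []
  | c :: rest =>
    pvCls c :: pvGo (rest.filter (fun d => pvCls d != pvCls c))
termination_by cs => cs.length
decreasing_by
  simp only [List.length_unattach]
  exact Nat.lt_succ_of_le (le_trans (List.length_filter_le _ _) (by simp))

def char_classes_py_alt (p : String) : List String :=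
  PySem.Set.ofList (pvGo p.toList)

-- ===== PRECONDITION & SPEC =====
def Spec_char_classes_py (p : String) (out : List String) : Prop := out = char_classes_py_alt p
instance (p : String) (out : List String) : Decidable (Spec_char_classes_py p out) := by unfold Spec_char_classes_py; infer_instance

-- ===== CLAIM (what is proved, stated in full; the proofs are below) =====
def Claim_equal_char_classes_py : Prop := ∀ (p : String), Dom_char_classes_py p → Spec_char_classes_py p (char_classes_py p)

-- ===== LEMMAS AND PROOFS =====

-- set(xs) commutes with filtering
theorem pv_filter_ofList (q : String → Bool) (l : List String) :
    List.filter q (PySem.Set.ofList l) = PySem.Set.ofList (List.filter q l) := by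
  induction l with
  | nil => rfl
  | cons a l ih =>
    have hd : ∀ (s : PySem.Set String) (x : String),
        PySem.Set.discard s x = List.filter (fun y => !(y == x)) s := by
      intro s x; simp [PySem.Set.discard]
    by_cases hqa : q a = true
    · conv_rhs => rw [List.filter_cons_of_pos hqa, PySem.Set.ofList_cons, hd]
      rw [PySem.Set.ofList_cons, List.filter_cons_of_pos hqa, hd, List.filter_comm, ih]
    · conv_rhs => rw [List.filter_cons_of_neg (by simpa using hqa)]
      rw [PySem.Set.ofList_cons, List.filter_cons_of_neg (by simpa using hqa), hd,
        List.filter_comm, ih]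
      apply List.filter_eq_self.mpr
      intro x hx
      simp only [Bool.not_eq_eq_eq_not, Bool.not_true, beq_eq_false_iff_ne, ne_eq]
      rintro rfl
      have : q x = true := by
        have := (PySem.Set.mem_ofList (xs := List.filter q l) (y := x)).mp hx
        exact (List.mem_filter.mp this).2
      simp [this] at hqa

theorem pv_ofList_cons_filter (x : String) (l : List String) :
    PySem.Set.ofList (x :: l) = x :: PySem.Set.ofList (l.filter (fun y => y != x)) := by
  rw [PySem.Set.ofList_cons, show ∀ (s : PySem.Set String) (y : String),
      PySem.Set.discard s y = List.filter (fun z => z != y) s from fun s y => by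
        simp [PySem.Set.discard, bne], pv_filter_ofList]

-- B's recursion computes set-of-first-occurrences of the classified characters
theorem pv_go_eq_aux (n : Nat) : ∀ (cs : List Char), cs.length ≤ n →
    pvGo cs = PySem.Set.ofList (cs.map pvCls) := by
  induction n with
  | zero =>
    intro cs h
    rw [List.length_eq_zero_iff.mp (Nat.le_zero.mp h)]
    simp only [pvGo, List.map_nil]
    rfl
  | succ n ih =>
    intro cs h
    match cs with
    | [] => simp only [pvGo, List.map_nil]; rfl
    | c :: rest =>
      rw [show pvGo (c :: rest) = pvCls c :: pvGo (rest.filter (fun d => pvCls d != pvCls c))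
          from by simp only [pvGo], ih _ (le_trans (List.length_filter_le _ _) (by simpa using h)),
        List.map_cons, pv_ofList_cons_filter, List.filter_map]
      rfl

theorem pv_go_eq (cs : List Char) : pvGo cs = PySem.Set.ofList (cs.map pvCls) :=
  pv_go_eq_aux cs.length cs le_rfl

-- A's loop is set(map(cls, p))
theorem pv_a_eq (p : String) :
    char_classes_py p = PySem.Set.ofList (p.toList.map pvCls) := by
  have hf : (fun (s : PySem.Set String) (c : Char) =>
      if PySem.Chars.islower c then PySem.Set.add s "lower"
      else if PySem.Chars.isupper c then PySem.Set.add s "upper"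
      else if PySem.Chars.isdigit c then PySem.Set.add s "digit"
      else PySem.Set.add s "special")
      = fun (s : PySem.Set String) (c : Char) => PySem.Set.add s (pvCls c) := by
    funext s c
    simp only [pvCls]
    split_ifs <;> rfl
  rw [char_classes_py, hf, ← PySem.Set.update_map_eq_foldl_add]
  exact PySem.Set.update_nil_left _

-- ===== VERDICT (by name: the statement is the Claim_ definition above) =====
theorem char_classes_py_spec : Claim_equal_char_classes_py := by
  intro p _
  unfold Spec_char_classes_py char_classes_py_alt
  rw [pv_go_eq, PySem.Set.ofList_ofList, pv_a_eq]
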